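-- pv_equiv track=rewrite | github.com/JohnReid/pybool | python/pybool/network.py | calculate_gene_change_points
-- ===== SOURCE A (Python) =====
-- def calculate_gene_change_points(X):
--     "Inspect the expression of a gene to find when it turns off and on."
--     on = False
--     for t, x in enumerate(X):
--         if bool(x) != on:
--             yield t
--             on = bool(x)
--     if on:
--         yield t
-- ===== SOURCE B (Python) =====
-- def calculate_gene_change_points(X):
--     "Inspect the expression of a gene to find when it turns off and on."
--     prev = False
--     idx = 0
--     n = len(X)
--     while idx < n:
--         val = bool(X[idx])
--         j = idx + 1
--         while j < n and bool(X[j]) == val: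
--             j += 1
--         if val != prev:
--             yield idx
--             prev = val
--         idx = j
--     if prev:
--         yield idx - 1
-- ===== Notes on version B (the rewrite author's own statement) =====
-- stated objective: alternative
-- what changed: Replaced the per-element flag scan over enumerate(X) with a run-based scan: an outer loop jumps from one maximal run of equal truth values to the next (inner pointer finds the run end), yielding the run's start index on a toggle and idx-1 at the end if the gene ends on.
import Mathlib
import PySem

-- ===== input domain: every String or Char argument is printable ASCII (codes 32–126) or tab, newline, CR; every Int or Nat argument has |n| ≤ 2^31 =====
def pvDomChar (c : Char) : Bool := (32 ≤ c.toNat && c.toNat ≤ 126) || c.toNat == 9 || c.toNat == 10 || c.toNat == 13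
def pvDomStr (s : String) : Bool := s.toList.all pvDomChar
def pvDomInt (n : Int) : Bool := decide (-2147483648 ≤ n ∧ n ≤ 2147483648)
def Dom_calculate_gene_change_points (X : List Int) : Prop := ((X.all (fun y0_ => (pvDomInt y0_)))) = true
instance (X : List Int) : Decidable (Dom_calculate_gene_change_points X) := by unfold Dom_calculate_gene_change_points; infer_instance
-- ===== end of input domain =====

-- B is a run-based scan (outer loop jumps run-by-run) instead of A's per-element flag scan; equivalence of the materialised yield sequences is proved (both are generators in Python).

-- ===== PORT A =====
-- A: flag scan over enumerate(X); state (on, t, acc); trailing yield of t when it ends on.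
def calculate_gene_change_points (X : List Int) : List Int :=
  let r := (PySem.List.enumerate X 0).foldl
    (fun (s : Bool × Int × List Int) (tx : Int × Int) =>
      let b : Bool := tx.2 != 0
      if b ≠ s.1 then (b, tx.1, s.2.2 ++ [tx.1]) else (s.1, tx.1, s.2.2))
    (false, 0, [])
  if r.1 then r.2.2 ++ [r.2.1] else r.2.2

-- ===== PORT B =====
-- inner while loop of Source B: advance j to the end of the current run of truth value `val`
-- (X.getD j 0 is exact here: j is always in range when read, Python's X[j])
def pvRunEnd (X : List Int) (val : Bool) (j : Nat) : Nat :=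
  if _ : j < X.length then
    if (X.getD j 0 != 0) = val then pvRunEnd X val (j+1) else j
  else j
termination_by X.length - j

theorem le_pvRunEnd (X : List Int) (val : Bool) (j : Nat) : j ≤ pvRunEnd X val j := by
  unfold pvRunEnd
  split
  · split
    · exact le_trans (Nat.le_succ j) (le_pvRunEnd X val (j+1))
    · exact le_refl j
  · exact le_refl j
termination_by X.length - j

-- outer while loop of Source B: state (prev, idx), emits run starts on toggles, and idx-1 at the end if still on
def pvBLoop (X : List Int) (prev : Bool) (idx : Nat) : List Int :=
  if _ : idx < X.length then
    let val : Bool := X.getD idx 0 != 0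
    let j := pvRunEnd X val (idx+1)
    (if val ≠ prev then [(idx : Int)] else []) ++ pvBLoop X val j
  else
    if prev then [(idx : Int) - 1] else []
termination_by X.length - idx
decreasing_by
  have := le_pvRunEnd X (X.getD idx 0 != 0) (idx+1)
  omega

def calculate_gene_change_points_alt (X : List Int) : List Int := pvBLoop X false 0

-- ===== PRECONDITION & SPEC =====
def Spec_calculate_gene_change_points (X : List Int) (out : List Int) : Prop := out = calculate_gene_change_points_alt X
instance (X : List Int) (out : List Int) : Decidable (Spec_calculate_gene_change_points X out) := by unfold Spec_calculate_gene_change_points; infer_instance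

-- ===== CLAIM (what is proved, stated in full; the proofs are below) =====
def Claim_equal_calculate_gene_change_points : Prop := ∀ (X : List Int), Dom_calculate_gene_change_points X → Spec_calculate_gene_change_points X (calculate_gene_change_points X)

-- ===== LEMMAS AND PROOFS =====

-- common characterisation: change points of xs starting at index idx with previous state prev
def pvSpecF : Bool → Int → List Int → List Int
  | prev, idx, [] => if prev then [idx - 1] else []
  | prev, idx, x :: xs =>
    (if (x != 0) ≠ prev then [idx] else []) ++ pvSpecF (x != 0) (idx + 1) xs

theorem pvFoldA (xs : List Int) (s : Int) (on : Bool) (t0 : Int) (acc : List Int)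
    (h : on = true → t0 = s - 1) :
    (let r := (PySem.List.enumerate xs s).foldl
      (fun (st : Bool × Int × List Int) (tx : Int × Int) =>
        let b : Bool := tx.2 != 0
        if b ≠ st.1 then (b, tx.1, st.2.2 ++ [tx.1]) else (st.1, tx.1, st.2.2))
      (on, t0, acc)
     if r.1 then r.2.2 ++ [r.2.1] else r.2.2) = acc ++ pvSpecF on s xs := by
  induction xs generalizing s on t0 acc with
  | nil =>
    simp only [PySem.List.enumerate_nil, List.foldl_nil, pvSpecF]
    cases hon : on with
    | true => simp [h hon]
    | false => simp
  | cons x xs ih =>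
    rw [PySem.List.enumerate_cons]
    simp only [pvSpecF]
    by_cases hb : (x != 0) = on
    · rw [List.foldl_cons]
      have hstep : (if ((s, x).2 != 0) ≠ (on, t0, acc).1
            then (((s, x).2 != 0), (s, x).1, (on, t0, acc).2.2 ++ [(s, x).1])
            else ((on, t0, acc).1, (s, x).1, (on, t0, acc).2.2))
          = ((x != 0), s, acc) := by simp [hb]
      rw [hstep]
      conv_rhs => rw [← hb, if_neg (fun hc => hc rfl), List.nil_append]
      exact ih (s + 1) (x != 0) s acc (fun _ => by ring)
    · rw [List.foldl_cons]
      have hstep : (if ((s, x).2 != 0) ≠ (on, t0, acc).1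
            then (((s, x).2 != 0), (s, x).1, (on, t0, acc).2.2 ++ [(s, x).1])
            else ((on, t0, acc).1, (s, x).1, (on, t0, acc).2.2))
          = ((x != 0), s, acc ++ [s]) := by simp [hb]
      rw [hstep]
      conv_rhs => rw [if_pos hb]
      rw [← List.append_assoc]
      exact ih (s + 1) (x != 0) s (acc ++ [s]) (fun _ => by ring)

theorem pvRunEnd_spec (X : List Int) (val : Bool) (j : Nat) :
    pvSpecF val (j : Int) (X.drop j) = pvSpecF val (pvRunEnd X val j : Int) (X.drop (pvRunEnd X val j)) := by
  unfold pvRunEnd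
  split
  · rename_i hj
    split
    · rename_i hv
      have hd : X.drop j = X[j] :: X.drop (j+1) := List.drop_eq_getElem_cons hj
      have hg : X.getD j 0 = X[j] := List.getD_eq_getElem X 0 hj
      rw [hd]
      have : pvSpecF val (↑j) (X[j] :: X.drop (j+1))
          = pvSpecF val ((j:Int)+1) (X.drop (j+1)) := by
        simp only [pvSpecF]
        rw [hg] at hv
        simp [hv]
      rw [this]
      have := pvRunEnd_spec X val (j+1)
      push_cast at this ⊢
      rw [this]
    · rfl
  · rfl
termination_by X.length - j

theorem pvBLoop_spec (X : List Int) (prev : Bool) (idx : Nat) :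
    pvBLoop X prev idx = pvSpecF prev (idx : Int) (X.drop idx) := by
  unfold pvBLoop
  split
  · rename_i hidx
    have hd : X.drop idx = X[idx] :: X.drop (idx+1) := List.drop_eq_getElem_cons hidx
    have hg : X.getD idx 0 = X[idx] := List.getD_eq_getElem X 0 hidx
    rw [hd]
    simp only [pvSpecF, hg]
    have h1 := pvRunEnd_spec X (X[idx] != 0) (idx+1)
    have h2 := pvBLoop_spec X (X[idx] != 0) (pvRunEnd X (X[idx] != 0) (idx+1))
    push_cast at h1 ⊢
    rw [h2, ← h1]
  · rename_i hidx
    rw [List.drop_eq_nil_of_le (by omega)]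
    rfl
termination_by X.length - idx
decreasing_by
  have := le_pvRunEnd X (X[idx] != 0) (idx+1)
  omega

-- ===== VERDICT (by name: the statement is the Claim_ definition above) =====
theorem calculate_gene_change_points_spec : Claim_equal_calculate_gene_change_points := by
  intro X _
  unfold Spec_calculate_gene_change_points calculate_gene_change_points calculate_gene_change_points_alt
  rw [pvBLoop_spec]
  simpa using pvFoldA X 0 false 0 [] (by simp)
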